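-- pv_equiv track=rewrite | github.com/pblankley/itf_linking | linkitf/clustering.py | get_cid_dict
-- ===== SOURCE A (Python) =====
-- def get_cid_dict(cluster_counter,shared=False,string=False):
--     """ This function takes in a cluster_counter object from a result of
--     find_clusters() or cluster_clusters().  The purpose of this function is to
--     make a strategic choice of how to display or organize overlapping clusters.
--     The shared tag, will assign a numeric cluster id (for graphing) to each
--     tracklet that appears only once in a cluster, and a common "cluster id" of
--     -42 to each cluster that is shared by two or more clusters. If the shared
--     option is switched off, clusters with more elements will always superseed
--     smaller clusters when both clusters claim a shared tracklet. Repeated below.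
--
--     NOTE:  If the shared option is switched off, clusters with more elements will
--     always superseed smaller clusters when both clusters claim a shared tracklet!
--     ---------
--     Args: cluster_counter; the cluster_counter object from a result of
--             find_clusters() or cluster_clusters().
--           shared; bool, a flag to determine whether the id's are calculated with
--                     a fixed shared value for all shared tracklets, or ordered
--                     where each tracklet automatically belongs to the biggest
--                     cluster it is a part of when it is part of more that 1 cluster.
--     ---------
--     Returns: cluster_id_dict; a dictionary where the key is tracklet id and
--                 the values are a numeric cluster id (used for visualization).
--     """
--     cluster_id_dict = {}
--     helper = {}
--     for i, str_cid in enumerate(cluster_counter.keys()):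
--         for tid in str_cid.split('|'):
--             if shared:
--                 if tid in cluster_id_dict.keys():
--                     cluster_id_dict[tid] = -42
--                 else:
--                     cluster_id_dict[tid] = i
--             else:
--                 if tid in cluster_id_dict.keys() and helper[tid]<len(str_cid.split('|')):
--                     if string:
--                         cluster_id_dict[tid] = str_cid
--                     else:
--                         cluster_id_dict[tid] = i
--                     helper[tid] = len(str_cid.split('|'))
--                 else:
--                     if string:
--                         cluster_id_dict[tid] = str_cid
--                     else:
--                         cluster_id_dict[tid] = i
--                     helper[tid] = len(str_cid.split('|'))
--
--     return cluster_id_dict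
-- ===== SOURCE B (Python) =====
-- def get_cid_dict(cluster_counter, shared=False, string=False):
--     # Two-phase: build an index tid -> list of (i, str_cid) occurrences, then emit.
--     index = {}
--     for i, str_cid in enumerate(cluster_counter.keys()):
--         for tid in str_cid.split('|'):
--             index.setdefault(tid, []).append((i, str_cid))
--     out = {}
--     for tid, occ in index.items():
--         if shared:
--             out[tid] = -42 if len(occ) > 1 else occ[0][0]
--         else:
--             out[tid] = occ[-1][1] if string else occ[-1][0]
--     return out
-- ===== Notes on version B (the rewrite author's own statement) =====
-- stated objective: alternative
-- what changed: Replaces the single interleaved loop (which maintains the result dict and a helper size dict, with two identical non-shared branches) by a two-phase algorithm: one pass builds an index tid -> list of (i, str_cid) occurrences, a second pass over that index emits each tid's id (-42 / single index when shared, last occurrence otherwise).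
-- outside the precondition, e.g. on get_cid_dict({'a|b': 1}, False, True): A returns {'a': 'a|b', 'b': 'a|b'}, B returns {'a': 'a|b', 'b': 'a|b'}
import Mathlib
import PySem

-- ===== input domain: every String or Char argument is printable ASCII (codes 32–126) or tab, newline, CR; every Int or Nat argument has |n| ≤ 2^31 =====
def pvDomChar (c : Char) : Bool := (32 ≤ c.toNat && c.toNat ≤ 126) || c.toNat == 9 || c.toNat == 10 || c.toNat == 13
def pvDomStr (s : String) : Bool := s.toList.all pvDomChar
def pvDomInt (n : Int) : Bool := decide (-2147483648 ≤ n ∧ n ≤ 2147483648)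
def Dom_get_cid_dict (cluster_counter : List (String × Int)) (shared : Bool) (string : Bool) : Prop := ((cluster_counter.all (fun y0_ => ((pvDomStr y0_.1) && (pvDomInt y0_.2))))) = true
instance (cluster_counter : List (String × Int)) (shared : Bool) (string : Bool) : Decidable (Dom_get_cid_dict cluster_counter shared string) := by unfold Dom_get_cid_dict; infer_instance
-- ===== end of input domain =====

-- B replaces A's single interleaved loop (result dict + helper dict, two identical non-shared
-- branches) by a two-phase algorithm: build an index tid -> occurrence list, then emit per tid
-- (objective: alternative decomposition, same cost).


-- ===== PORT A =====
-- cluster_counter is a Python dict: cluster_counter.keys() = its distinct keys in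
-- first-occurrence order = PySem.List.dedup of the association list's keys.
-- str_cid.split('|') = (PySem.Str.split? str_cid "|").getD [] (the separator is nonempty, so never none).
def get_cid_dict (cluster_counter : List (String × Int)) (shared : Bool) (string : Bool) : List (String × Int) :=
  -- state = (cluster_id_dict, helper); the result is state.1.items
  ((PySem.List.enumerate (PySem.List.dedup (cluster_counter.map Prod.fst))).foldl
      (fun (st : PySem.Dict String Int × PySem.Dict String Int) p =>
        ((PySem.Str.split? p.2 "|").getD []).foldl
          (fun st tid =>
            if shared then
              (if st.1.contains tid then st.1.insert tid (-42) else st.1.insert tid p.1, st.2)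
            else
              -- Python: `tid in cluster_id_dict.keys() and helper[tid] < len(str_cid.split('|'))`;
              -- `and` short-circuits, and whenever tid is in cluster_id_dict it is in helper too
              -- (both are always written together), so `getD tid 0` is exact where it is read.
              -- With string=True Python assigns str_cid, a String value outside the declared
              -- dict[str,int] type; Pre_ excludes shared=false ∧ string=true, so the branches
              -- below carry the string=false assignment (= i) in both arms, as in the Python.
              if st.1.contains tid && decide (st.2.getD tid 0 < (((PySem.Str.split? p.2 "|").getD []).length : Int)) then
                (st.1.insert tid p.1, st.2.insert tid (((PySem.Str.split? p.2 "|").getD []).length : Int))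
              else
                (st.1.insert tid p.1, st.2.insert tid (((PySem.Str.split? p.2 "|").getD []).length : Int)))
          st)
      (PySem.Dict.empty, PySem.Dict.empty)).1.items

-- ===== PORT B =====
-- Phase 1 builds index : tid -> list of (i, str_cid) occurrences (setdefault(tid,[]).append(..)
-- = Dict.modify tid [] (· ++ [..])); phase 2 maps over the index emitting each tid's id.
def get_cid_dict_alt (cluster_counter : List (String × Int)) (shared : Bool) (string : Bool) : List (String × Int) :=
  ((PySem.List.enumerate (PySem.List.dedup (cluster_counter.map Prod.fst))).foldl
      (fun d p =>
        ((PySem.Str.split? p.2 "|").getD []).foldl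
          (fun d tid => d.modify tid [] (fun l => l ++ [(p.1, p.2)])) d)
      (PySem.Dict.empty : PySem.Dict String (List (Int × String)))).items.map (fun q =>
    (q.1,
      if shared then (if q.2.length > 1 then (-42 : Int) else (q.2.headD (0, "")).1)
      -- with string=True Python B emits occ[-1][1], a String, excluded by Pre_;
      -- the declared-type (string=False) emission is occ[-1][0]:
      else (q.2.getLastD (0, "")).1))

-- ===== PRECONDITION & SPEC =====
-- Pre_ excludes shared=False ∧ string=True: there A (and B) return a dict whose values are the
-- cluster-key STRINGS, not values of the declared dict[str,int] type List (String × Int).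
def Pre_get_cid_dict (cluster_counter : List (String × Int)) (shared : Bool) (string : Bool) : Prop :=
  shared = true ∨ string = false
instance (cluster_counter : List (String × Int)) (shared : Bool) (string : Bool) : Decidable (Pre_get_cid_dict cluster_counter shared string) := by unfold Pre_get_cid_dict; infer_instance
def pvWitness_get_cid_dict : (List (String × Int)) × Bool × Bool := ([("a|b", 2), ("b|c", 1)], false, false)
def Spec_get_cid_dict (cluster_counter : List (String × Int)) (shared : Bool) (string : Bool) (out : List (String × Int)) : Prop := out = get_cid_dict_alt cluster_counter shared string
instance (cluster_counter : List (String × Int)) (shared : Bool) (string : Bool) (out : List (String × Int)) : Decidable (Spec_get_cid_dict cluster_counter shared string out) := by unfold Spec_get_cid_dict; infer_instance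

-- ===== CLAIM (what is proved, stated in full; the proofs are below) =====
def Claim_equal_get_cid_dict : Prop := ∀ (cluster_counter : List (String × Int)) (shared : Bool) (string : Bool), Dom_get_cid_dict cluster_counter shared string → Pre_get_cid_dict cluster_counter shared string → Spec_get_cid_dict cluster_counter shared string (get_cid_dict cluster_counter shared string)

-- ===== LEMMAS AND PROOFS =====

-- the common flat sequence of operations (tid, (i, str_cid)) both programs traverse
def pvOps (cluster_counter : List (String × Int)) : List (String × (Int × String)) :=
  (PySem.List.enumerate (PySem.List.dedup (cluster_counter.map Prod.fst))).flatMap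
    (fun p => ((PySem.Str.split? p.2 "|").getD []).map (fun tid => (tid, (p.1, p.2))))

lemma foldl_fst_hom {α β γ : Type} (step : α × β → γ → α × β) (f : α → γ → α)
    (h : ∀ st x, (step st x).1 = f st.1 x) :
    ∀ (L : List γ) (st : α × β), (L.foldl step st).1 = L.foldl f st.1 := by
  intro L
  induction L with
  | nil => intro st; rfl
  | cons a L ih => intro st; rw [List.foldl, List.foldl, ih, h]

lemma getD_foldl_insert_lastFilter {α : Type} (key : α → String) (f : α → Int) :
    ∀ (L : List α) (d : PySem.Dict String Int) (k : String) (dflt : Int),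
      (L.foldl (fun d x => d.insert (key x) (f x)) d).getD k dflt =
        ((L.filter (fun x => key x == k)).map f).getLastD (d.getD k dflt) := by
  intro L
  induction L with
  | nil => intro d k dflt; rfl
  | cons a L ih =>
    intro d k dflt
    simp only [List.foldl, List.filter]
    by_cases h : key a = k
    · have hb : (key a == k) = true := by simp [h]
      rw [hb, List.map_cons, List.getLastD_cons, ih]
      simp [PySem.Dict.getD_insert_self, h]
    · have hb : (key a == k) = false := by simp [h]
      rw [hb]
      simp only [ih, PySem.Dict.getD_insert]
      rw [if_neg (fun hk => h hk.symm)]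

lemma getD_of_not_contains {ν : Type} (d : PySem.Dict String ν) (k : String) (dflt : ν)
    (hc : d.contains k = false) : d.getD k dflt = dflt := by
  simp [PySem.Dict.getD, (PySem.Dict.get?_eq_none_iff_contains d k).2 hc]

lemma getD_foldl_shared {α : Type} (key : α → String) (f : α → Int) :
    ∀ (L : List α) (d : PySem.Dict String Int) (k : String),
      (L.foldl (fun d x => if d.contains (key x) then d.insert (key x) (-42) else d.insert (key x) (f x)) d).getD k 0 =
        if d.contains k then
          (if (L.filter (fun x => key x == k)) = [] then d.getD k 0 else -42)
        else
          (match L.filter (fun x => key x == k) with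
           | [] => 0
           | a :: rest => if rest = [] then f a else -42) := by
  intro L
  induction L with
  | nil =>
    intro d k
    by_cases hc : d.contains k = true
    · simp [hc, List.filter]
    · simp [hc, List.filter, getD_of_not_contains d k 0 (by simpa using hc)]
  | cons a L ih =>
    intro d k
    simp only [List.foldl, List.filter_cons]
    by_cases h : key a = k
    · have hb : (key a == k) = true := by simp [h]
      rw [hb]; subst h
      by_cases hc : d.contains (key a) = true
      · rw [if_pos hc, ih]
        simp [PySem.Dict.contains_insert, PySem.Dict.getD_insert_self, hc]
      · rw [if_neg hc, ih]
        simp [PySem.Dict.contains_insert, PySem.Dict.getD_insert_self, hc]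
    · have hb : (key a == k) = false := by simp [h]
      rw [hb]
      have hne : ¬ k = key a := fun e => h e.symm
      have hkb : (k == key a) = false := beq_eq_false_iff_ne.2 hne
      by_cases hc : d.contains (key a) = true
      · rw [if_pos hc, ih]
        simp [PySem.Dict.contains_insert, PySem.Dict.getD_insert, hkb, hne]
      · rw [if_neg hc, ih]
        simp [PySem.Dict.contains_insert, PySem.Dict.getD_insert, hkb, hne]

-- named step functions / index for the proofs
def stepS (d : PySem.Dict String Int) (op : String × Int × String) : PySem.Dict String Int :=
  if d.contains op.1 then d.insert op.1 (-42) else d.insert op.1 op.2.1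

def stepN (d : PySem.Dict String Int) (op : String × Int × String) : PySem.Dict String Int :=
  d.insert op.1 op.2.1

def bIndex (cluster_counter : List (String × Int)) : PySem.Dict String (List (Int × String)) :=
  (pvOps cluster_counter).foldl (fun d op => d.modify op.1 [] (fun l => l ++ [op.2])) PySem.Dict.empty

lemma A_items_shared (cc : List (String × Int)) (string : Bool) :
    get_cid_dict cc true string = ((pvOps cc).foldl stepS PySem.Dict.empty).items := by
  unfold get_cid_dict pvOps
  rw [List.foldl_flatMap]
  simp only [List.foldl_map]
  congr 1
  apply foldl_fst_hom
  intro st p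
  apply foldl_fst_hom
  intro st tid
  simp [stepS]

lemma A_items_not (cc : List (String × Int)) (string : Bool) :
    get_cid_dict cc false string = ((pvOps cc).foldl stepN PySem.Dict.empty).items := by
  unfold get_cid_dict pvOps
  rw [List.foldl_flatMap]
  simp only [List.foldl_map]
  congr 1
  apply foldl_fst_hom
  intro st p
  apply foldl_fst_hom
  intro st tid
  simp [stepN]

lemma B_items (cc : List (String × Int)) (shared string : Bool) :
    get_cid_dict_alt cc shared string = (bIndex cc).items.map (fun q =>
      (q.1,
        if shared then (if q.2.length > 1 then (-42 : Int) else (q.2.headD (0, "")).1)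
        else (q.2.getLastD (0, "")).1)) := by
  unfold get_cid_dict_alt bIndex pvOps
  rw [List.foldl_flatMap]
  simp only [List.foldl_map]

-- the keys list both result dicts share
def pvKeys (cc : List (String × Int)) : List String :=
  PySem.Set.update ([] : PySem.Set String) ((pvOps cc).map Prod.fst)

lemma keys_stepS (cc : List (String × Int)) :
    ((pvOps cc).foldl stepS PySem.Dict.empty).keys = pvKeys cc := by
  have h : stepS = fun d (op : String × Int × String) =>
      d.insert op.1 (if d.contains op.1 then -42 else op.2.1) := by
    funext d op
    unfold stepS
    by_cases hc : d.contains op.1 = true <;> simp [hc]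
  rw [h, PySem.Dict.keys_foldl_insert_key (pvOps cc) Prod.fst]
  rfl

lemma keys_stepN (cc : List (String × Int)) :
    ((pvOps cc).foldl stepN PySem.Dict.empty).keys = pvKeys cc := by
  rw [show stepN = fun d (op : String × Int × String) => d.insert op.1 op.2.1 from rfl,
    PySem.Dict.keys_foldl_insert_key (pvOps cc) Prod.fst]
  rfl

lemma keys_bIndex (cc : List (String × Int)) : (bIndex cc).keys = pvKeys cc := by
  unfold bIndex
  rw [PySem.Dict.keys_foldl_modify_key (pvOps cc) Prod.fst [] (fun _ op l => l ++ [op.2])]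
  rfl

lemma nodup_pvKeys (cc : List (String × Int)) : (pvKeys cc).Nodup := by
  have := PySem.Dict.nodup_keys_foldl_modify_key (pvOps cc) Prod.fst []
    (fun _ op l => l ++ [op.2]) (PySem.Dict.empty : PySem.Dict String (List (Int × String)))
    (by simp [PySem.Dict.empty, PySem.Dict.keys])
  rw [← keys_bIndex cc]
  exact PySem.Dict.nodup_keys_foldl_modify_key _ _ _ _ _ (by simp [PySem.Dict.empty, PySem.Dict.keys])

lemma mem_pvKeys_filter_ne {cc : List (String × Int)} {k : String}
    (hk : k ∈ pvKeys cc) : (pvOps cc).filter (fun op => op.1 == k) ≠ [] := by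
  intro hnil
  rw [pvKeys, ] at hk
  have := (PySem.Set.mem_update ([] : PySem.Set String) ((pvOps cc).map Prod.fst) k).1 hk
  rcases this with h | h
  · simp at h
  · rcases List.mem_map.1 h with ⟨op, hop, rfl⟩
    have := List.filter_eq_nil_iff.1 hnil op hop
    simp at this

lemma getD_bIndex (cc : List (String × Int)) (k : String) :
    (bIndex cc).getD k [] = ((pvOps cc).filter (fun op => op.1 == k)).map (fun op => op.2) := by
  unfold bIndex
  rw [PySem.Dict.getD_foldl_modify_append, PySem.Dict.getD_empty]
  simp

-- ===== VERDICT (by name: the statement is the Claim_ definition above) =====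
theorem get_cid_dict_spec : Claim_equal_get_cid_dict := by
  unfold Claim_equal_get_cid_dict
  intro cc shared string hdom hpre
  unfold Spec_get_cid_dict
  rw [B_items]
  cases shared with
  | true =>
    rw [A_items_shared cc string,
      PySem.Dict.items_eq_map_keys _ (by rw [keys_stepS]; exact nodup_pvKeys cc) 0,
      PySem.Dict.items_eq_map_keys (bIndex cc) (by rw [keys_bIndex]; exact nodup_pvKeys cc) [],
      keys_stepS, keys_bIndex, List.map_map]
    apply List.map_congr_left
    intro k hk
    have hfil := mem_pvKeys_filter_ne hk
    simp only [Function.comp]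
    refine Prod.ext rfl ?_
    rw [getD_bIndex]
    have hA := getD_foldl_shared (α := String × Int × String) Prod.fst (fun op => op.2.1)
      (pvOps cc) PySem.Dict.empty k
    rw [show (fun (d : PySem.Dict String Int) (op : String × Int × String) =>
        if d.contains op.1 then d.insert op.1 (-42) else d.insert op.1 op.2.1) = stepS from rfl] at hA
    rw [hA, PySem.Dict.contains_empty]
    simp only [Bool.false_eq_true, if_false]
    cases hF : (pvOps cc).filter (fun op => op.1 == k) with
    | nil => exact absurd hF hfil
    | cons a rest =>
      simp only [List.map_cons, List.headD_cons, List.length_cons]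
      cases rest with
      | nil => simp
      | cons b rest' => simp
  | false =>
    rw [A_items_not cc string,
      PySem.Dict.items_eq_map_keys _ (by rw [keys_stepN]; exact nodup_pvKeys cc) 0,
      PySem.Dict.items_eq_map_keys (bIndex cc) (by rw [keys_bIndex]; exact nodup_pvKeys cc) [],
      keys_stepN, keys_bIndex, List.map_map]
    apply List.map_congr_left
    intro k hk
    have hfil := mem_pvKeys_filter_ne hk
    simp only [Function.comp]
    refine Prod.ext rfl ?_
    rw [getD_bIndex]
    have hA := getD_foldl_insert_lastFilter (α := String × Int × String) Prod.fst (fun op => op.2.1)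
      (pvOps cc) PySem.Dict.empty k 0
    rw [show (fun (d : PySem.Dict String Int) (op : String × Int × String) =>
        d.insert op.1 op.2.1) = stepN from rfl] at hA
    rw [hA]
    cases hF : (pvOps cc).filter (fun op => op.1 == k) with
    | nil => exact absurd hF hfil
    | cons a rest =>
      rw [List.getLastD_eq_getLast?, List.getLastD_eq_getLast?, List.getLast?_map,
        List.getLast?_map]
      cases hL : (a :: rest).getLast? with
      | none => simp at hL
      | some q => simp
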